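-- pv_equiv track=rewrite | github.com/Waste-Wood/Continual-Joint-Reasoning | utils/tools.py | filter_pos
-- ===== SOURCE A (Python) =====
-- def filter_pos(pos_tags):
--     noun_adj_words = []
--     for sentence in pos_tags:
--         meaningful_words = []
--         tmp_words = []
--         pre = 'Random'
--         for word in sentence:
--             if word[1].startswith(pre):
--                 tmp_words.append(word[0])
--             else:
--                 if pre in ['NN', 'JJ']:
--                     meaningful_words.append(' '.join(tmp_words).lower())
--                 pre = word[1][:2]
--                 tmp_words = [word[0]]
--         if pre in ['NN', 'JJ']:
--             meaningful_words.append(' '.join(tmp_words).lower())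
--
--         # noun_adj_words.append([meaningful_words, sentence])
--         noun_adj_words.append(meaningful_words)
--     return noun_adj_words
-- ===== SOURCE B (Python) =====
-- def filter_pos(pos_tags):
--     out = []
--     for sentence in pos_tags:
--         # pass 1: explicit run list; each run = (anchor_prefix, words)
--         runs = [('Random', [])]
--         for word in sentence:
--             if word[1].startswith(runs[-1][0]):
--                 runs[-1][1].append(word[0])
--             else:
--                 runs.append((word[1][:2], [word[0]]))
--         # pass 2: keep noun/adjective runs, join and lowercase
--         out.append([' '.join(ws).lower() for (p, ws) in runs if p in ('NN', 'JJ')])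
--     return out
-- ===== Notes on version B (the rewrite author's own statement) =====
-- stated objective: alternative
-- what changed: B replaces A's inline flush-on-close state machine by two passes: it first materialises the full run list (anchor prefix, words) per sentence, then filters NN/JJ runs and joins/lowercases them in a comprehension.
import Mathlib
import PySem

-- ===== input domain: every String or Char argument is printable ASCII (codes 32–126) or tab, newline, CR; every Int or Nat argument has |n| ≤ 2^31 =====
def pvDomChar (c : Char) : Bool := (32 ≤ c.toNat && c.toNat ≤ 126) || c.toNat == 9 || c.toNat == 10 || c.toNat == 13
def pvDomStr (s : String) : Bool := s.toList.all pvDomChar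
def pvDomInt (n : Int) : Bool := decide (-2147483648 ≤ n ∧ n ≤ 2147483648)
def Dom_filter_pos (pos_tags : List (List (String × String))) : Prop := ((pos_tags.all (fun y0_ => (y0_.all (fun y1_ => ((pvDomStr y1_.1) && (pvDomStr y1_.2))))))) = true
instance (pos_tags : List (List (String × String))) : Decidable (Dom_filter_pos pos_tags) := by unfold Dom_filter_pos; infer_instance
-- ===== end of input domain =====

-- B restructures A's inline flush-on-close state machine into two passes (build run list, then filter/join); same cost, alternative decomposition.

-- ===== PORT A =====
-- A's inner loop state: (meaningful_words, pre, tmp_words)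
def pvStepA (st : List String × String × List String) (word : String × String) :
    List String × String × List String :=
  let (mw, pre, tmp) := st
  if PySem.Str.startswith word.2 pre then
    (mw, pre, tmp ++ [word.1])
  else
    let mw' := if pre = "NN" ∨ pre = "JJ" then mw ++ [PySem.Str.lower (PySem.Str.join " " tmp)] else mw
    (mw', PySem.Str.slice word.2 none (some 2), [word.1])

def pvSentA (sentence : List (String × String)) : List String :=
  let st := sentence.foldl pvStepA ([], "Random", [])
  if st.2.1 = "NN" ∨ st.2.1 = "JJ" then st.1 ++ [PySem.Str.lower (PySem.Str.join " " st.2.2)] else st.1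

def filter_pos (pos_tags : List (List (String × String))) : List (List String) :=
  pos_tags.foldl (fun acc sentence => acc ++ [pvSentA sentence]) []

-- ===== PORT B =====
-- B keeps the run stack head-first (head = runs[-1]); the [] branch is unreachable.
def pvStepB (runs : List (String × List String)) (word : String × String) :
    List (String × List String) :=
  match runs with
  | (p, ws) :: rest =>
      if PySem.Str.startswith word.2 p then (p, ws ++ [word.1]) :: rest
      else (PySem.Str.slice word.2 none (some 2), [word.1]) :: (p, ws) :: rest
  | [] => []

def pvSentB (sentence : List (String × String)) : List String :=
  let runs := (sentence.foldl pvStepB [("Random", ([] : List String))]).reverse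
  (runs.filter (fun r => r.1 == "NN" || r.1 == "JJ")).map
    (fun r => PySem.Str.lower (PySem.Str.join " " r.2))

def filter_pos_alt (pos_tags : List (List (String × String))) : List (List String) :=
  pos_tags.map pvSentB

-- ===== PRECONDITION & SPEC =====
def Spec_filter_pos (pos_tags : List (List (String × String))) (out : List (List String)) : Prop := out = filter_pos_alt pos_tags
instance (pos_tags : List (List (String × String))) (out : List (List String)) : Decidable (Spec_filter_pos pos_tags out) := by unfold Spec_filter_pos; infer_instance

-- ===== CLAIM (what is proved, stated in full; the proofs are below) =====
def Claim_equal_filter_pos : Prop := ∀ (pos_tags : List (List (String × String))), Dom_filter_pos pos_tags → Spec_filter_pos pos_tags (filter_pos pos_tags)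

-- ===== LEMMAS AND PROOFS =====

def pvOut (runs : List (String × List String)) : List String :=
  (runs.filter (fun r => r.1 == "NN" || r.1 == "JJ")).map
    (fun r => PySem.Str.lower (PySem.Str.join " " r.2))

theorem pvOut_append (xs ys : List (String × List String)) :
    pvOut (xs ++ ys) = pvOut xs ++ pvOut ys := by
  simp [pvOut]

-- the rest of the run stack below the head is inert
theorem pvStepB_inert (ws : List (String × String)) :
    ∀ (pre : String) (tmp : List String) (rest : List (String × List String)),
    ws.foldl pvStepB ((pre, tmp) :: rest) = ws.foldl pvStepB [(pre, tmp)] ++ rest := by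
  induction ws with
  | nil => intro pre tmp rest; simp
  | cons w ws ih =>
    intro pre tmp rest
    simp only [List.foldl_cons, pvStepB]
    by_cases h : PySem.Str.startswith w.2 pre = true
    · rw [if_pos h, if_pos h]
      exact ih _ _ rest
    · rw [if_neg h, if_neg h]
      rw [ih _ _ ((pre, tmp) :: rest), ih _ _ [(pre, tmp)], List.append_assoc]
      rfl

theorem pvKey (ws : List (String × String)) :
    ∀ (mw : List String) (pre : String) (tmp : List String),
    (let st := ws.foldl pvStepA (mw, pre, tmp)
     if st.2.1 = "NN" ∨ st.2.1 = "JJ" then st.1 ++ [PySem.Str.lower (PySem.Str.join " " st.2.2)] else st.1)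
    = mw ++ pvOut ((ws.foldl pvStepB [(pre, tmp)]).reverse) := by
  induction ws with
  | nil =>
    intro mw pre tmp
    by_cases h : pre = "NN" ∨ pre = "JJ" <;> simp [pvOut, h]
  | cons w ws ih =>
    intro mw pre tmp
    simp only [List.foldl_cons, pvStepA, pvStepB]
    by_cases h : PySem.Str.startswith w.2 pre = true
    · simp only [h, if_true]
      exact ih mw pre (tmp ++ [w.1])
    · simp only [h, Bool.false_eq_true, if_false]
      rw [ih _ _ [w.1], pvStepB_inert ws _ [w.1] [(pre, tmp)]]
      rw [List.reverse_append, pvOut_append]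
      by_cases hp : pre = "NN" ∨ pre = "JJ" <;>
        simp [hp, pvOut, List.append_assoc]

theorem pvSent_eq (sentence : List (String × String)) : pvSentA sentence = pvSentB sentence := by
  have := pvKey sentence [] "Random" []
  simpa [pvSentA, pvSentB, pvOut] using this

theorem filter_pos_eq (pos_tags : List (List (String × String))) :
    filter_pos pos_tags = filter_pos_alt pos_tags := by
  unfold filter_pos filter_pos_alt
  induction pos_tags using List.reverseRecOn with
  | nil => simp
  | append_singleton xs x ih =>
    rw [List.foldl_append, ih, List.map_append]
    simp [pvSent_eq]

-- ===== VERDICT (by name: the statement is the Claim_ definition above) =====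
theorem filter_pos_spec : Claim_equal_filter_pos := by
  intro pos_tags _
  unfold Spec_filter_pos
  exact filter_pos_eq pos_tags
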